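-- pv_equiv track=rewrite | github.com/xu-shi-jie/prime | models/utils.py | segment_cmd
-- ===== SOURCE A (Python) =====
-- def segment_cmd(cmd_str: str, max_len: int = 1000):
--     cmds = ['']
--     prev = 0
--     for i, c in enumerate(cmd_str):
--         if c == ';':
--             if len(cmds[-1]) + len(cmd_str[prev:i]) > max_len:
--                 cmds.append('')
--             cmds[-1] += cmd_str[prev:i + 1]
--             prev = i + 1
--     return cmds
-- ===== SOURCE B (Python) =====
-- def segment_cmd(cmd_str: str, max_len: int = 1000):
--     cmds = ['']
--     rest = cmd_str
--     while ';' in rest: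
--         seg, rest = rest.split(';', 1)
--         if len(cmds[-1]) + len(seg) > max_len:
--             cmds.append('')
--         cmds[-1] += seg + ';'
--     return cmds
-- ===== Notes on version B (the rewrite author's own statement) =====
-- stated objective: faster
-- what changed: A runs a per-character Python loop with enumerate, a running start index and explicit slicing to cut out each segment; B instead repeatedly splits off the next semicolon-terminated segment with one bounded split call and packs whole segments, so the per-character interpreter loop is replaced by native string operations.
import Mathlib
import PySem

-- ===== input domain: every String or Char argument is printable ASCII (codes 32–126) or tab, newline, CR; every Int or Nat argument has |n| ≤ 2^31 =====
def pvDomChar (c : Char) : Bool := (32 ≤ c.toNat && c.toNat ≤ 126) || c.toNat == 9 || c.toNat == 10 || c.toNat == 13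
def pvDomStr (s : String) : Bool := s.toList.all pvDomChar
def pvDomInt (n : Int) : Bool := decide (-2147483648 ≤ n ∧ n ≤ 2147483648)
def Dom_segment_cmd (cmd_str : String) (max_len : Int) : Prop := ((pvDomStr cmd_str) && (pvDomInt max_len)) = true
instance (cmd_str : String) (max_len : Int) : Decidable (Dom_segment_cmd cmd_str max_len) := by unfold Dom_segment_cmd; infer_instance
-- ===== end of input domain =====

-- B replaces A's per-character enumerate/start-index/slice bookkeeping by repeatedly splitting
-- off the next semicolon-terminated segment with one bounded split call (measured faster).

-- ===== PORT A =====
-- buckets are kept as List Char (PySem string model); cmds[-1] is getLastD, cmds[-1] += x is dropLast ++ [last ++ x]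
def segment_cmd (cmd_str : String) (max_len : Int) : List String :=
  let s := cmd_str.toList
  let st :=
    (PySem.List.enumerate s 0).foldl
      (fun (st : List (List Char) × Int) (p : Int × Char) =>
        if p.2 == ';' then
          let cmds := st.1
          let cmds :=
            if ((cmds.getLastD []).length : Int)
                + ((PySem.List.slice s (some st.2) (some p.1)).length : Int) > max_len
            then cmds ++ [[]] else cmds
          (cmds.dropLast ++ [cmds.getLastD [] ++ PySem.List.slice s (some st.2) (some (p.1 + 1))],
           p.1 + 1)
        else st)
      ([[]], 0)
  st.1.map (fun l => String.ofList l)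

-- ===== PORT B =====
-- one packing step: if the segment does not fit, open a new bucket; then cmds[-1] += seg + ';'
def pvBStep (max_len : Int) (cmds : List (List Char)) (seg : List Char) : List (List Char) :=
  let cmds :=
    if ((cmds.getLastD []).length : Int) + (seg.length : Int) > max_len
    then cmds ++ [[]] else cmds
  cmds.dropLast ++ [cmds.getLastD [] ++ seg ++ [';']]

-- the while loop: rest.split(';', 1) ported by hand as (takeWhile (· ≠ ';'), tail of dropWhile);
-- exact for the single-character separator ';' when ';' ∈ rest (the loop guard)
def pvBGo (max_len : Int) (cmds : List (List Char)) (rest : List Char) : List (List Char) :=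
  if h : ';' ∈ rest then
    let seg := rest.takeWhile (· ≠ ';')
    pvBGo max_len (pvBStep max_len cmds seg) ((rest.dropWhile (· ≠ ';')).tail)
  else cmds
termination_by rest.length
decreasing_by
  have h1 : rest.dropWhile (· ≠ ';') ≠ [] := by
    intro hnil
    have := List.dropWhile_eq_nil_iff.mp hnil
    simp at this
    exact absurd (this ';' h) (by simp)
  have h2 : (rest.dropWhile (· ≠ ';')).length ≤ rest.length := List.length_dropWhile_le _ _
  have h3 : 0 < (rest.dropWhile (· ≠ ';')).length := List.length_pos_iff.mpr h1
  have h4 : (rest.dropWhile (· ≠ ';')).tail.length = (rest.dropWhile (· ≠ ';')).length - 1 :=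
    List.length_tail
  omega

def segment_cmd_alt (cmd_str : String) (max_len : Int) : List String :=
  (pvBGo max_len [[]] cmd_str.toList).map (fun l => String.ofList l)

-- ===== PRECONDITION & SPEC =====
def Spec_segment_cmd (cmd_str : String) (max_len : Int) (out : List String) : Prop := out = segment_cmd_alt cmd_str max_len
instance (cmd_str : String) (max_len : Int) (out : List String) : Decidable (Spec_segment_cmd cmd_str max_len out) := by unfold Spec_segment_cmd; infer_instance

-- ===== CLAIM (what is proved, stated in full; the proofs are below) =====
def Claim_equal_segment_cmd : Prop := ∀ (cmd_str : String) (max_len : Int), Dom_segment_cmd cmd_str max_len → Spec_segment_cmd cmd_str max_len (segment_cmd cmd_str max_len)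

-- ===== LEMMAS AND PROOFS =====

theorem pvTakeW (pend t : List Char) (h : ';' ∉ pend) :
    (pend ++ ';' :: t).takeWhile (fun x => !decide (x = ';')) = pend := by
  induction pend with
  | nil => simp
  | cons a l ih =>
    simp only [List.mem_cons, not_or] at h
    have ha : ¬ a = ';' := fun e => h.1 e.symm
    simp [ha, ih h.2]

theorem pvDropW (pend t : List Char) (h : ';' ∉ pend) :
    (pend ++ ';' :: t).dropWhile (fun x => !decide (x = ';')) = ';' :: t := by
  induction pend with
  | nil => simp
  | cons a l ih =>
    simp only [List.mem_cons, not_or] at h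
    have ha : ¬ a = ';' := fun e => h.1 e.symm
    simp [ha, ih h.2]

theorem pvMain (max_len : Int) (s : List Char) :
    ∀ (tail : List Char) (prev : Nat) (pend : List Char) (cmds : List (List Char)),
      s.drop prev = pend ++ tail → ';' ∉ pend →
      ((PySem.List.enumerate tail ((prev + pend.length : Nat) : Int)).foldl
        (fun (st : List (List Char) × Int) (p : Int × Char) =>
          if p.2 == ';' then
            let cmds := st.1
            let cmds :=
              if ((cmds.getLastD []).length : Int)
                  + ((PySem.List.slice s (some st.2) (some p.1)).length : Int) > max_len
              then cmds ++ [[]] else cmds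
            (cmds.dropLast ++ [cmds.getLastD [] ++ PySem.List.slice s (some st.2) (some (p.1 + 1))],
             p.1 + 1)
          else st)
        (cmds, (prev : Int))).1 = pvBGo max_len cmds (pend ++ tail) := by
  intro tail
  induction tail with
  | nil =>
    intro prev pend cmds hdrop hpend
    rw [pvBGo]
    simp [PySem.List.enumerate, hpend]
  | cons c t ih =>
    intro prev pend cmds hdrop hpend
    rw [PySem.List.enumerate_cons, List.foldl_cons]
    by_cases hc : c = ';'
    · subst hc
      have hk1 : ((prev + pend.length : Nat) : Int) + 1 = ((prev + pend.length + 1 : Nat) : Int) := by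
        push_cast; ring
      have hsl1 : PySem.List.slice s (some (prev : Int)) (some ((prev + pend.length : Nat) : Int))
          = pend := by
        rw [PySem.List.slice_natCast, hdrop]
        simp
      have hsl2 : PySem.List.slice s (some (prev : Int)) (some (((prev + pend.length : Nat) : Int) + 1))
          = pend ++ [';'] := by
        rw [hk1, PySem.List.slice_natCast, hdrop]
        have h2 : pend ++ ';' :: t = (pend ++ [';']) ++ t := by simp
        rw [h2, show prev + pend.length + 1 - prev = pend.length + 1 by omega,
          List.take_left' (by simp)]
      simp only [beq_self_eq_true, if_true, hsl1, hsl2]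
      have hdrop' : s.drop (prev + pend.length + 1) = [] ++ t := by
        have e1 : List.drop (pend.length + 1) (List.drop prev s)
            = List.drop (prev + (pend.length + 1)) s := List.drop_drop
        rw [hdrop] at e1
        rw [show pend ++ ';' :: t = (pend ++ [';']) ++ t by simp,
          List.drop_left' (by simp)] at e1
        rw [show prev + pend.length + 1 = prev + (pend.length + 1) by omega, ← e1]
        simp
      have := ih (prev + pend.length + 1) [] (pvBStep max_len cmds pend) hdrop' (by simp)
      simp only [List.length_nil, Nat.add_zero, List.nil_append] at this
      have hgo : pvBGo max_len cmds (pend ++ ';' :: t)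
          = pvBGo max_len (pvBStep max_len cmds pend) t := by
        rw [pvBGo]
        simp [pvTakeW pend t hpend, pvDropW pend t hpend]
      rw [hk1, hgo, ← this]
      congr 1
      simp [pvBStep, List.append_assoc]
    · have hcb : (c == ';') = false := by simp [hc]
      simp only [hcb, Bool.false_eq_true, if_false]
      have hdrop' : s.drop prev = (pend ++ [c]) ++ t := by simpa using hdrop
      have := ih prev (pend ++ [c]) cmds hdrop' (by simp [hpend, Ne.symm hc])
      simp only [List.length_append, List.length_cons, List.length_nil] at this ⊢
      rw [show ((prev + pend.length : Nat) : Int) + 1 = ((prev + (pend.length + 1) : Nat) : Int) by push_cast; ring]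
      simpa [Nat.add_assoc] using this

theorem segment_cmd_spec : Claim_equal_segment_cmd := by
  intro cmd_str max_len _
  unfold Spec_segment_cmd segment_cmd segment_cmd_alt
  have := pvMain max_len cmd_str.toList cmd_str.toList 0 [] [[]] (by simp) (by simp)
  simp only [List.length_nil, Nat.add_zero, Nat.cast_zero, List.nil_append] at this
  exact congrArg (List.map (fun l => String.ofList l)) this
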